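-- pv_equiv track=rewrite | github.com/nazarkorniychuk/JaneStreetAMP | CS/Warm-Up/Python Warm-Up [CS2-CS3]/code/drive-download-20240711T174331Z-001/anagame.py | parse_guess
-- ===== SOURCE A (Python) =====
-- def parse_guess(guess:str) -> tuple:
--     '''Splits an entered guess into a two word tuple with all white space removed
--
--         Args:
--             guess (str): A single string reprsenting the player guess
--
--         Returns:
--             tuple: A tuple of two words. ("", "") in case of invalid input.
--
--         Examples
--         --------
--         >>> parse_guess("eat, tea")
--         ("eat", "tea")
--
--         >>> parse_guess("eat , tea")
--         ("eat", "tea")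
--
--         >>> parse_guess("eat,tea")
--         ("eat", "tea")
--
--         >>> parse_guess("eat tea")
--         ("", "")
--     '''
--     ### BEGIN SOLUTION
--     i = 0
--     first_word = ""
--     second_word = ""
--     while(i < len(guess)):
--         if (guess[i] != "," ):
--             if (guess[i] != " "):
--                 first_word += guess[i]
--             i+= 1
--         else:
--             break
--     i+=1
--     while(i < len(guess)):
--         if (guess[i] != " ") and (ord(guess[i]) < 122 and ord(guess[i]) > 61):
--             second_word += guess[i]
--         elif (guess[i] != " "):
--             return ("", "")
--         i+= 1
--     if (second_word != "") and (first_word != ""):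
--         return (first_word, second_word)
--     else:
--         return ("", "")
-- ===== SOURCE B (Python) =====
-- def parse_guess(guess: str) -> tuple:
--     parts = guess.split(',', 1)
--     if len(parts) == 1:
--         return ("", "")
--     first_word = parts[0].replace(' ', '')
--     second_word = parts[1].replace(' ', '')
--     if not all(61 < ord(c) < 122 for c in second_word):
--         return ("", "")
--     return (first_word, second_word) if first_word and second_word else ("", "")
-- ===== Notes on version B (the rewrite author's own statement) =====
-- stated objective: simpler
-- what changed: Replaces the two hand-written index-based while loops (char-by-char string accumulation with break and early return) with a one-shot split on the first comma, space removal via replace, and an all() validation over the second part.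
import Mathlib
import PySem

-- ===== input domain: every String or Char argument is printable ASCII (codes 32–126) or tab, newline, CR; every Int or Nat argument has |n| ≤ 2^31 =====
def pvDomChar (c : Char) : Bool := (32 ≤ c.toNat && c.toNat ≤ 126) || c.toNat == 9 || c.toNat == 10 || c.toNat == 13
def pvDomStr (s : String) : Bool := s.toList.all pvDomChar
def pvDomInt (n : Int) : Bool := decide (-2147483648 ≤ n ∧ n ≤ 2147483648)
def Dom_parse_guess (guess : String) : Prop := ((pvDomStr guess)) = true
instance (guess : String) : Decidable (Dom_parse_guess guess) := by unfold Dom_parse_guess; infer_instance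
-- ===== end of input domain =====

-- B replaces A's two index-based while loops with split-on-first-comma, space removal and an all() validation (objective: simpler).

-- ===== PORT A =====
-- first while loop: accumulate non-space chars until ',' (break); returns (first_word, chars after the comma)
def pvALoop1 : List Char → List Char → List Char × List Char
  | [], acc => (acc, [])
  | c :: cs, acc =>
    if c ≠ ',' then pvALoop1 cs (if c ≠ ' ' then acc ++ [c] else acc)
    else (acc, cs)

-- second while loop: accumulate valid chars; none = the early 'return ("","")'
def pvALoop2 : List Char → List Char → Option (List Char)
  | [], acc => some acc
  | c :: cs, acc =>
    if c ≠ ' ' ∧ (c.toNat < 122 ∧ 61 < c.toNat) then pvALoop2 cs (acc ++ [c])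
    else if c ≠ ' ' then none
    else pvALoop2 cs acc

def parse_guess (guess : String) : String × String :=
  let r := pvALoop1 guess.toList []
  match pvALoop2 r.2 [] with
  | none => ("", "")
  | some sw => if sw ≠ [] ∧ r.1 ≠ [] then (String.mk r.1, String.mk sw) else ("", "")

-- ===== PORT B =====
-- split(',',1): parts[0] = takeWhile (≠','), parts[1] = tail of dropWhile; one part iff no comma
def parse_guess_alt (guess : String) : String × String :=
  let cs := guess.toList
  if ',' ∈ cs then
    let first_word := (cs.takeWhile (· ≠ ',')).filter (· ≠ ' ')
    let second_word := ((cs.dropWhile (· ≠ ',')).tail).filter (· ≠ ' ')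
    if second_word.all (fun c => 61 < c.toNat && c.toNat < 122) then
      if first_word ≠ [] ∧ second_word ≠ [] then (String.mk first_word, String.mk second_word)
      else ("", "")
    else ("", "")
  else ("", "")

-- ===== PRECONDITION & SPEC =====
def Spec_parse_guess (guess : String) (out : String × String) : Prop := out = parse_guess_alt guess
instance (guess : String) (out : String × String) : Decidable (Spec_parse_guess guess out) := by unfold Spec_parse_guess; infer_instance

-- ===== CLAIM (what is proved, stated in full; the proofs are below) =====
def Claim_equal_parse_guess : Prop := ∀ (guess : String), Dom_parse_guess guess → Spec_parse_guess guess (parse_guess guess)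

-- ===== LEMMAS AND PROOFS =====
theorem pvALoop1_spec (cs acc : List Char) :
    pvALoop1 cs acc =
      (acc ++ (cs.takeWhile (· ≠ ',')).filter (· ≠ ' '), (cs.dropWhile (· ≠ ',')).tail) := by
  induction cs generalizing acc with
  | nil => simp [pvALoop1]
  | cons c cs ih =>
    by_cases hc : c = ','
    · simp [pvALoop1, hc]
    · by_cases hs : c = ' ' <;>
        simp [pvALoop1, hc, hs, ih]

theorem pvALoop2_spec (cs acc : List Char) :
    pvALoop2 cs acc =
      if (cs.filter (· ≠ ' ')).all (fun c => 61 < c.toNat && c.toNat < 122)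
      then some (acc ++ cs.filter (· ≠ ' ')) else none := by
  induction cs generalizing acc with
  | nil => simp [pvALoop2]
  | cons c cs ih =>
    by_cases hs : c = ' '
    · simp [pvALoop2, hs, ih]
    · by_cases hv : 61 < c.toNat ∧ c.toNat < 122
      · have : c ≠ ' ' ∧ (c.toNat < 122 ∧ 61 < c.toNat) := ⟨hs, hv.2, hv.1⟩
        simp [pvALoop2, this, ih]
      · have h1 : ¬ (c ≠ ' ' ∧ (c.toNat < 122 ∧ 61 < c.toNat)) := by
          intro ⟨_, h2, h3⟩; exact hv ⟨h3, h2⟩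
        have h2 : ¬ (61 < c.toNat ∧ c.toNat < 122) := hv
        simp only [pvALoop2, if_neg h1, if_pos hs]
        simp [hs]
        intro h3 h4
        exact absurd ⟨h3, h4⟩ h2

theorem no_comma_tail (cs : List Char) (h : ',' ∉ cs) :
    (cs.dropWhile (· ≠ ',')).tail = [] := by
  induction cs with
  | nil => rfl
  | cons c cs ih =>
    by_cases hc : c = ','
    · exact absurd (hc ▸ List.mem_cons_self) h
    · have h' : ',' ∉ cs := fun hx => h (List.mem_cons_of_mem _ hx)
      simpa [List.dropWhile_cons, hc] using ih h'

-- ===== VERDICT (by name: the statement is the Claim_ definition above) =====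
theorem parse_guess_spec : Claim_equal_parse_guess := by
  intro guess _
  unfold Spec_parse_guess parse_guess parse_guess_alt
  simp only [pvALoop1_spec, pvALoop2_spec, List.nil_append]
  by_cases hm : ',' ∈ guess.toList
  · rw [if_pos hm]
    set fw := (guess.toList.takeWhile (· ≠ ',')).filter (· ≠ ' ') with hfw
    set sw := ((guess.toList.dropWhile (· ≠ ',')).tail).filter (· ≠ ' ') with hsw
    by_cases hv : sw.all (fun c => 61 < c.toNat && c.toNat < 122)
    · rw [if_pos hv, if_pos hv]
      show (if sw ≠ [] ∧ fw ≠ [] then (String.mk fw, String.mk sw) else ("", "")) = _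
      by_cases h1 : sw = []
      · rw [if_neg (fun h => h.1 h1), if_neg (fun h => h.2 h1)]
      · by_cases h2 : fw = []
        · rw [if_neg (fun h => h.2 h2), if_neg (fun h => h.1 h2)]
        · rw [if_pos ⟨h1, h2⟩, if_pos ⟨h2, h1⟩]
    · rw [if_neg hv, if_neg hv]
  · rw [if_neg hm, no_comma_tail _ hm]
    rfl
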